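-- pv_equiv track=rewrite | github.com/idearendil/apple_game_AI | gather_data.py | edge_count_from_matrix
-- ===== SOURCE A (Python) =====
-- def edge_count_from_matrix(matrix, value):
--     height = len(matrix)
--     width = len(matrix[0])
--
--     count_num = 0
--     for row_idx, row in enumerate(matrix):
--         for val_idx, val in enumerate(row):
--             if row_idx == 0 or row_idx == height - 1 or val_idx == 0 or val_idx == width - 1:
--                 if val == value:
--                     count_num += 1
--     return count_num
-- ===== SOURCE B (Python) =====
-- def edge_count_from_matrix(matrix, value):
--     total = matrix[0].count(value)
--     if len(matrix) > 1:
--         total += matrix[-1].count(value)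
--     w = len(matrix[0])
--     for row in matrix[1:-1]:
--         total += row[:1].count(value)       # left edge cell
--         if w > 1:                           # right edge is a distinct column
--             total += row[w - 1:w].count(value)
--     return total
-- ===== Notes on version B (the rewrite author's own statement) =====
-- stated objective: faster
-- what changed: B visits only the border: it counts value in the first and last rows and, per interior row, in the one-element slices at the left and right edge columns, instead of A's scan of every cell with an index test.
import Mathlib
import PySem

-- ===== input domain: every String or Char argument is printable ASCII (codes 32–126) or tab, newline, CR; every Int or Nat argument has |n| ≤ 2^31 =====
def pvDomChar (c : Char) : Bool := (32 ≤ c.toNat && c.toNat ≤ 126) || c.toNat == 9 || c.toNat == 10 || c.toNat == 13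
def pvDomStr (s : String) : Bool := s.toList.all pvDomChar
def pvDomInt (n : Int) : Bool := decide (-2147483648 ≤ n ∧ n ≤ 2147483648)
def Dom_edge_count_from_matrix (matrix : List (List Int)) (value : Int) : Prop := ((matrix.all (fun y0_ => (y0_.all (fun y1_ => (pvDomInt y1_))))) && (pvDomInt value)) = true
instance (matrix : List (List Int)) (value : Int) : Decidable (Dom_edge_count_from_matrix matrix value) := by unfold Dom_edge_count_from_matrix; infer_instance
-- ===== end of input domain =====

-- B counts over the border only: the first and last rows plus one-element edge slices of each
-- interior row, instead of A's scan of every cell with an index test.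

-- ===== PORT A =====
-- literal transliteration of A: width is taken from matrix[0] (IndexError on [] — excluded by Pre_)
def edge_count_from_matrix (matrix : List (List Int)) (value : Int) : Int :=
  let height : Int := matrix.length
  let width : Int := (((PySem.List.pyGet? matrix 0).getD []).length : Int)
  (PySem.List.enumerate matrix 0).foldl (fun count_num p =>
    (PySem.List.enumerate p.2 0).foldl (fun c q =>
      if p.1 = 0 ∨ p.1 = height - 1 ∨ q.1 = 0 ∨ q.1 = width - 1 then
        (if q.2 = value then c + 1 else c)
      else c) count_num) 0

-- ===== PORT B =====
-- literal transliteration of B (Source B)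
def edge_count_from_matrix_alt (matrix : List (List Int)) (value : Int) : Int :=
  let total : Int := (PySem.List.count ((PySem.List.pyGet? matrix 0).getD []) value : Int)
  let total := if (matrix.length : Int) > 1
    then total + (PySem.List.count ((PySem.List.pyGet? matrix (-1)).getD []) value : Int)
    else total
  let w : Int := (((PySem.List.pyGet? matrix 0).getD []).length : Int)
  (PySem.List.slice matrix (some 1) (some (-1))).foldl (fun t row =>
    let t := t + (PySem.List.count (PySem.List.slice row none (some 1)) value : Int)
    if w > 1
    then t + (PySem.List.count (PySem.List.slice row (some (w - 1)) (some w)) value : Int)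
    else t) total

-- ===== PRECONDITION & SPEC =====
-- Pre_ excludes only the empty matrix, on which the Python A raises IndexError (matrix[0]).
def Pre_edge_count_from_matrix (matrix : List (List Int)) (value : Int) : Prop := matrix ≠ []
instance (matrix : List (List Int)) (value : Int) : Decidable (Pre_edge_count_from_matrix matrix value) := by unfold Pre_edge_count_from_matrix; infer_instance
def pvWitness_edge_count_from_matrix : List (List Int) × Int := ([[1, 2], [3, 1]], 1)

def Spec_edge_count_from_matrix (matrix : List (List Int)) (value : Int) (out : Int) : Prop := out = edge_count_from_matrix_alt matrix value
instance (matrix : List (List Int)) (value : Int) (out : Int) : Decidable (Spec_edge_count_from_matrix matrix value out) := by unfold Spec_edge_count_from_matrix; infer_instance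

-- ===== CLAIM (what is proved, stated in full; the proofs are below) =====
def Claim_equal_edge_count_from_matrix : Prop := ∀ (matrix : List (List Int)) (value : Int), Dom_edge_count_from_matrix matrix value → Pre_edge_count_from_matrix matrix value → Spec_edge_count_from_matrix matrix value (edge_count_from_matrix matrix value)

-- ===== LEMMAS AND PROOFS =====

-- number of elements of `row` equal to `value`, as an Int (what A's inner loop adds on a full row)
def cAll (value : Int) : List Int → Int
  | [] => 0
  | x :: t => (if x = value then 1 else 0) + cAll value t

-- what A's inner loop adds on an interior row whose enumeration starts at s
def cMid (value w : Int) : List Int → Int → Int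
  | [], _ => 0
  | x :: t, s => (if (s = 0 ∨ s = w - 1) ∧ x = value then 1 else 0) + cMid value w t (s + 1)

theorem cAll_eq_count (value : Int) (row : List Int) :
    cAll value row = (PySem.List.count row value : Int) := by
  induction row with
  | nil => simp [cAll, PySem.List.count]
  | cons x t ih =>
      simp [cAll, PySem.List.count, List.count_cons, ih]
      by_cases h : x = value <;> simp [h, beq_iff_eq] <;> push_cast <;> ring

theorem innerA_all (height width value ri : Int) (hC : ri = 0 ∨ ri = height - 1)
    (row : List Int) : ∀ (s acc : Int),
    (PySem.List.enumerate row s).foldl (fun c q =>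
      if ri = 0 ∨ ri = height - 1 ∨ q.1 = 0 ∨ q.1 = width - 1 then
        (if q.2 = value then c + 1 else c)
      else c) acc = acc + cAll value row := by
  induction row with
  | nil => intro s acc; simp [PySem.List.enumerate, cAll]
  | cons x t ih =>
      intro s acc
      rw [PySem.List.enumerate_cons, List.foldl_cons, ih]
      rcases hC with h | h <;> simp only [h, true_or, or_true, if_true, cAll] <;>
        by_cases hx : x = value <;> simp [hx] <;> ring

theorem innerA_mid (height width value ri : Int) (h0 : ri ≠ 0) (hh : ri ≠ height - 1)
    (row : List Int) : ∀ (s acc : Int),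
    (PySem.List.enumerate row s).foldl (fun c q =>
      if ri = 0 ∨ ri = height - 1 ∨ q.1 = 0 ∨ q.1 = width - 1 then
        (if q.2 = value then c + 1 else c)
      else c) acc = acc + cMid value width row s := by
  induction row with
  | nil => intro s acc; simp [PySem.List.enumerate, cMid]
  | cons x t ih =>
      intro s acc
      rw [PySem.List.enumerate_cons, List.foldl_cons, ih]
      simp only [cMid]
      by_cases hs : s = 0 ∨ s = width - 1 <;> by_cases hx : x = value <;>
        simp [hs, h0, hh, hx] <;> ring

-- B's per-row addition on an interior row, as written in Source B (one-element slices)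
def gB (value w : Int) (row : List Int) : Int :=
  (PySem.List.count (PySem.List.slice row none (some 1)) value : Int)
  + (if w > 1
     then (PySem.List.count (PySem.List.slice row (some (w - 1)) (some w)) value : Int)
     else 0)

-- a positional characterisation of gB, used as the bridge from A's index test
def gIdx (value w : Int) (row : List Int) : Int :=
  (if row ≠ [] ∧ (PySem.List.pyGet? row 0).getD 0 = value then 1 else 0)
  + (if 2 ≤ w ∧ w ≤ (row.length : Int) ∧ (PySem.List.pyGet? row (w - 1)).getD 0 = value
     then 1 else 0)

-- the tail of an interior row (enumeration starting at s ≥ 1) contributes the single cell at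
-- absolute index w-1, if it exists
theorem cMid_tail (value w : Int) (t : List Int) : ∀ s : Int, 1 ≤ s →
    cMid value w t s =
      if s ≤ w - 1 ∧ w - 1 < s + (t.length : Int) ∧
          (PySem.List.pyGet? t (w - 1 - s)).getD 0 = value then 1 else 0 := by
  induction t with
  | nil => intro s hs; simp [cMid]; omega
  | cons x u ih =>
      intro s hs
      rw [cMid, ih (s + 1) (by omega)]
      have hlen : ((x :: u).length : Int) = (u.length : Int) + 1 := by
        push_cast [List.length_cons]; ring
      by_cases hw : s = w - 1
      · have h1 : ¬ (s + 1 ≤ w - 1) := by omega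
        have h2 : w - 1 - s = 0 := by omega
        have hb1 : s ≤ w - 1 := by omega
        have hb2 : w - 1 < s + ((x :: u).length : Int) := by rw [hlen]; omega
        rw [h2]
        simp only [h1, false_and, if_false, add_zero, PySem.List.pyGet?_zero_cons,
          Option.getD_some]
        by_cases hx : x = value
        · simp [hw, hx, hb1, hb2]
        · simp [hx, hw]
      · have h2 : ¬ ((s = 0 ∨ s = w - 1) ∧ x = value) := by
          rintro ⟨h, _⟩; rcases h with h | h <;> omega
        simp only [h2, if_false, zero_add]
        by_cases hcmp : s ≤ w - 1
        · have hpos : 1 ≤ w - 1 - s := by omega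
          have hcast : (w - 1 - (s + 1)) = ((w - 1 - (s + 1)).toNat : Int) := by omega
          have hidx : w - 1 - s = ((w - 1 - (s + 1)).toNat : Int) + 1 := by omega
          have hgeteq : (PySem.List.pyGet? (x :: u) (w - 1 - s)).getD 0 =
              (PySem.List.pyGet? u (w - 1 - (s + 1))).getD 0 := by
            rw [hcast, hidx, PySem.List.pyGet?_cons_succ]
          have hiff : (s + 1 ≤ w - 1 ∧ w - 1 < s + 1 + (u.length : Int) ∧
              (PySem.List.pyGet? u (w - 1 - (s + 1))).getD 0 = value) ↔
              (s ≤ w - 1 ∧ w - 1 < s + ((x :: u).length : Int) ∧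
              (PySem.List.pyGet? (x :: u) (w - 1 - s)).getD 0 = value) := by
            rw [hgeteq, hlen]
            constructor <;> rintro ⟨ha, hb, hc⟩ <;> exact ⟨by omega, by omega, hc⟩
          rw [if_congr hiff rfl rfl]
        · have hn1 : ¬ (s + 1 ≤ w - 1) := by omega
          simp [hn1, hcmp]

theorem cMid_eq_gIdx (value w : Int) (row : List Int) :
    cMid value w row 0 = gIdx value w row := by
  cases row with
  | nil =>
      simp [cMid, gIdx]
      intro h1 h2; omega
  | cons x t =>
      rw [cMid, zero_add, cMid_tail value w t 1 (by omega), gIdx]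
      congr 1
      · by_cases hx : x = value <;> simp [hx]
      · by_cases hw2 : 2 ≤ w
        · have hlen : ((x :: t).length : Int) = (t.length : Int) + 1 := by
            push_cast [List.length_cons]; ring
          have hcast : (w - 1 - 1) = ((w - 2).toNat : Int) := by omega
          have hidx : w - 1 = ((w - 2).toNat : Int) + 1 := by omega
          have hgeteq : (PySem.List.pyGet? (x :: t) (w - 1)).getD 0 =
              (PySem.List.pyGet? t (w - 1 - 1)).getD 0 := by
            rw [hcast, hidx, PySem.List.pyGet?_cons_succ]
          have hiff : ((1 : Int) ≤ w - 1 ∧ w - 1 < 1 + (t.length : Int) ∧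
              (PySem.List.pyGet? t (w - 1 - 1)).getD 0 = value) ↔
              (2 ≤ w ∧ w ≤ ((x :: t).length : Int) ∧
              (PySem.List.pyGet? (x :: t) (w - 1)).getD 0 = value) := by
            rw [hgeteq, hlen]
            constructor <;> rintro ⟨ha, hb, hc⟩ <;> exact ⟨by omega, by omega, hc⟩
          rw [if_congr hiff rfl rfl]
        · have h1 : ¬ ((1 : Int) ≤ w - 1) := by omega
          simp [h1, hw2]

-- count over the slice row[:1] is the 0/1 test on the head cell
theorem count_slice_head (value : Int) (row : List Int) :
    (PySem.List.count (PySem.List.slice row none (some 1)) value : Int) =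
      if row ≠ [] ∧ (PySem.List.pyGet? row 0).getD 0 = value then 1 else 0 := by
  have h1 : PySem.List.slice row none (some ((1 : Nat) : Int)) = row.take 1 :=
    PySem.List.slice_to_natCast row 1
  norm_num at h1
  rw [h1]
  cases row with
  | nil => simp [PySem.List.count]
  | cons x t =>
      simp only [List.take_succ_cons, List.take_zero, PySem.List.count,
        PySem.List.pyGet?_zero_cons, Option.getD_some, ne_eq, reduceCtorEq,
        not_false_eq_true, true_and]
      by_cases hx : x = value <;> simp [hx, List.count_cons]

-- count over the slice row[w-1:w] (for w ≥ 2) is the 0/1 test on the cell at index w-1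
theorem count_slice_last (value w : Int) (hw : 2 ≤ w) (row : List Int) :
    (PySem.List.count (PySem.List.slice row (some (w - 1)) (some w)) value : Int) =
      if w ≤ (row.length : Int) ∧ (PySem.List.pyGet? row (w - 1)).getD 0 = value
      then 1 else 0 := by
  obtain ⟨k, hk⟩ : ∃ k : Nat, w = ((k + 1 : Nat) : Int) := ⟨(w - 1).toNat, by omega⟩
  have hw1 : w - 1 = ((k : Nat) : Int) := by omega
  rw [hw1, hk, PySem.List.slice_natCast]
  rw [show k + 1 - k = 1 from by omega]
  by_cases hlen : ((k + 1 : Nat) : Int) ≤ (row.length : Int)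
  · have hlt : k < row.length := by omega
    have hdrop : (row.drop k).take 1 = [row[k]] := by
      rw [List.take_one, List.head?_drop, List.getElem?_eq_getElem hlt]
      rfl
    have hget : (PySem.List.pyGet? row ((k : Nat) : Int)).getD 0 = row[k] := by
      rw [PySem.List.pyGet?_ofNat row k hlt]
      rfl
    rw [hdrop, hget]
    by_cases hx : row[k] = value <;> simp [hx, PySem.List.count] <;> omega
  · have hdrop : row.drop k = [] := by
      apply List.drop_eq_nil_of_le; omega
    rw [hdrop]
    simp only [List.take_nil, PySem.List.count, List.count_nil, Nat.cast_zero]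
    rw [if_neg (by omega)]

theorem gIdx_eq_gB (value w : Int) (row : List Int) :
    gIdx value w row = gB value w row := by
  rw [gIdx, gB, count_slice_head]
  congr 1
  by_cases hw : 2 ≤ w
  · rw [count_slice_last value w hw row]
    have hgt : w > 1 := by omega
    simp only [hgt, if_true, hw, true_and]
  · have hgt : ¬ (w > 1) := by omega
    simp [hgt, hw]

-- sum of B's per-row additions over the interior rows
def sumG (value w : Int) : List (List Int) → Int
  | [] => 0
  | r :: rs => gB value w r + sumG value w rs

theorem foldA_mid (height width value : Int) (mid : List (List Int)) :
    ∀ (s acc : Int), 1 ≤ s → s + (mid.length : Int) ≤ height - 1 →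
    (PySem.List.enumerate mid s).foldl (fun count_num p =>
      (PySem.List.enumerate p.2 0).foldl (fun c q =>
        if p.1 = 0 ∨ p.1 = height - 1 ∨ q.1 = 0 ∨ q.1 = width - 1 then
          (if q.2 = value then c + 1 else c)
        else c) count_num) acc = acc + sumG value width mid := by
  induction mid with
  | nil => intro s acc _ _; simp [PySem.List.enumerate, sumG]
  | cons r t ih =>
      intro s acc hs hle
      push_cast [List.length_cons] at hle
      rw [PySem.List.enumerate_cons, List.foldl_cons,
        innerA_mid height width value s (by omega) (by omega),
        ih (s + 1) _ (by omega) (by omega), cMid_eq_gIdx, gIdx_eq_gB, sumG]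
      ring

theorem foldB_mid (value w : Int) (mid : List (List Int)) : ∀ acc : Int,
    mid.foldl (fun t row =>
      let t := t + (PySem.List.count (PySem.List.slice row none (some 1)) value : Int)
      if w > 1
      then t + (PySem.List.count (PySem.List.slice row (some (w - 1)) (some w)) value : Int)
      else t) acc = acc + sumG value w mid := by
  induction mid with
  | nil => intro acc; simp [sumG]
  | cons r t ih =>
      intro acc
      rw [List.foldl_cons, ih, sumG]
      simp only [gB]
      split_ifs <;> ring

-- the slice matrix[1:-1] of r :: mid ++ [last] is mid
theorem slice_interior (r last : List Int) (mid : List (List Int)) :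
    PySem.List.slice (r :: (mid ++ [last])) (some 1) (some (-1)) = mid := by
  simp only [PySem.List.slice, PySem.List.clampIdx]
  norm_num
  rw [if_neg (show ¬ ((mid.length : Int) + 1 < 0) by omega)]
  rw [show mid.length + 1 - 1 = mid.length by omega]
  exact List.take_left

-- ===== VERDICT (by name: the statement is the Claim_ definition above) =====
theorem edge_count_from_matrix_spec : Claim_equal_edge_count_from_matrix := by
  intro matrix value _ hpre
  unfold Spec_edge_count_from_matrix
  cases matrix with
  | nil => exact absurd rfl hpre
  | cons r rs =>
      rcases rs.eq_nil_or_concat with hrs | ⟨mid, last, hrs⟩ <;> subst hrs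
      · -- single-row matrix
        simp only [edge_count_from_matrix, edge_count_from_matrix_alt,
          PySem.List.pyGet?_zero_cons, Option.getD_some]
        rw [PySem.List.enumerate_cons, PySem.List.enumerate_nil, List.foldl_cons,
          List.foldl_nil, innerA_all _ _ value 0 (Or.inl rfl),
          if_neg (show ¬ (((List.length [r] : Nat) : Int) > 1) by simp), zero_add,
          cAll_eq_count]
        rw [show PySem.List.slice [r] (some 1) (some (-1)) = [] from rfl]
        simp
      · -- at least two rows: r :: mid ++ [last]
        simp only [edge_count_from_matrix, edge_count_from_matrix_alt,
          PySem.List.pyGet?_zero_cons, Option.getD_some, List.concat_eq_append]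
        rw [PySem.List.enumerate_cons, List.foldl_cons,
          innerA_all _ _ value 0 (Or.inl rfl),
          show (0 : Int) + 1 = 1 from by norm_num,
          PySem.List.enumerate_append, List.foldl_append,
          foldA_mid (((r :: (mid ++ [last])).length : Nat) : Int) _ value mid 1 _ (by omega)
            (by push_cast [List.length_cons, List.length_append]; omega),
          PySem.List.enumerate_cons, PySem.List.enumerate_nil, List.foldl_cons, List.foldl_nil,
          innerA_all (((r :: (mid ++ [last])).length : Nat) : Int) _ value (1 + (mid.length : Int))
            (Or.inr (by push_cast [List.length_cons, List.length_append, List.length_nil]; ring)),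
          show (r :: (mid ++ [last])) = ((r :: mid) ++ [last]) from rfl,
          PySem.List.pyGet?_neg_one_append_singleton, Option.getD_some]
        rw [show ((r :: mid) ++ [last]) = (r :: (mid ++ [last])) from rfl, slice_interior]
        rw [if_pos (show (((r :: (mid ++ [last])).length : Nat) : Int) > 1 by
          push_cast [List.length_cons, List.length_append]; omega)]
        rw [foldB_mid, cAll_eq_count, cAll_eq_count]
        ring
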